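-- pv_equiv track=rewrite | github.com/grant-king/ML_progress | DCP_challenges/1_poker/poker.py | extract_ranks
-- ===== SOURCE A (Python) =====
-- def extract_ranks(hand):
--     """return sorted list of card ranks as ints from hand, without the
--     suit. Ace may be high or low."""
--     substitutions = {
--         'T': '10',
--         'J': '11',
--         'Q': '12',
--         'K': '13',
--         'A': '14',
--     }
--     ranks = [card[0] for card in hand]
--     for idx, card_rank in enumerate(ranks):
--         if card_rank in substitutions.keys():
--             ranks[idx] = substitutions[card_rank]
--     ranks = sorted(map(int, ranks), reverse=True)
--     if ranks == [14, 5, 4, 3, 2]: #check for ace low straight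
--         return [5, 4, 3, 2, 1]
--     return ranks
-- ===== SOURCE B (Python) =====
-- _RANKMAP = {'T': 10, 'J': 11, 'Q': 12, 'K': 13, 'A': 14}
--
--
-- def extract_ranks(hand):
--     """return sorted list of card ranks as ints from hand, without the
--     suit. Ace may be high or low."""
--     # counting sort over the fixed rank universe 0..14 instead of sorted()
--     counts = [0] * 15
--     for card in hand:
--         c = card[0]
--         r = _RANKMAP[c] if c in _RANKMAP else int(c)
--         counts[r] += 1
--     ranks = []
--     for r in range(14, -1, -1):
--         ranks += [r] * counts[r]
--     if ranks == [14, 5, 4, 3, 2]:  # check for ace low straight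
--         return [5, 4, 3, 2, 1]
--     return ranks
-- ===== Notes on version B (the rewrite author's own statement) =====
-- stated objective: alternative
-- what changed: replaces build-list-then-substitute-then-comparison-sort with a single pass that buckets each card's rank into a count array over the fixed universe 0..14 and emits the descending list by reading the buckets from 14 down (counting sort); same ace-low special case
import Mathlib
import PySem

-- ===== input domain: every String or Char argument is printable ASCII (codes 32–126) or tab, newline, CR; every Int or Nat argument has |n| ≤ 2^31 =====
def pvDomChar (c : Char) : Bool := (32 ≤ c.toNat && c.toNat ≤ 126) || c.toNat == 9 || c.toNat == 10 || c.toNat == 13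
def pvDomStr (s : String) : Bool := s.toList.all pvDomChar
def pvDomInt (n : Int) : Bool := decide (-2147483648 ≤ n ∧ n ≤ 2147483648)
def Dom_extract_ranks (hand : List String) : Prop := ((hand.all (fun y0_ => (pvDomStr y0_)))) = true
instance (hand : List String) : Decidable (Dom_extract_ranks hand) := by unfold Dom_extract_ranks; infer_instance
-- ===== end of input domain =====

-- B replaces A's substitute-then-sorted(reverse=True) with a one-pass counting sort over the fixed rank universe 0..14 (alternative algorithm).
-- Neither program mutates anything the caller observes beyond the return value.

-- ===== PORT A =====
def pvSubs : PySem.Dict String String :=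
  PySem.Dict.ofList [("T", "10"), ("J", "11"), ("Q", "12"), ("K", "13"), ("A", "14")]

-- ranks = [card[0] for card in hand] ; card[0] is the 1-char string (none = IndexError, excluded by Pre_, "" default unreachable)
def pvRanks0 (hand : List String) : List String :=
  hand.map (fun card =>
    match PySem.Str.pyGet? card 0 with
    | some c => String.mk [c]
    | none => "")

-- for idx, card_rank in enumerate(ranks): if card_rank in substitutions.keys(): ranks[idx] = substitutions[card_rank]
-- (the loop at step idx only writes index idx, so iterating over the pre-computed enumerate is exact)
def pvRanks1 (hand : List String) : List String :=
  (PySem.List.enumerate (pvRanks0 hand)).foldl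
    (fun acc p => if pvSubs.contains p.2 then PySem.List.pySetD acc p.1 ((pvSubs.get? p.2).getD "") else acc)
    (pvRanks0 hand)

-- ranks = sorted(map(int, ranks), reverse=True) ; int(s) ValueError excluded by Pre_, 0 default unreachable
def pvRanksSorted (hand : List String) : List Int :=
  PySem.List.sorted ((pvRanks1 hand).map (fun s => (PySem.Int.ofStr? s).getD 0)) (fun x => x) true

def extract_ranks (hand : List String) : List Int :=
  if pvRanksSorted hand = [14, 5, 4, 3, 2] then [5, 4, 3, 2, 1] else pvRanksSorted hand

-- ===== PORT B =====
def pvRankMap : PySem.Dict Char Int :=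
  PySem.Dict.ofList [('T', 10), ('J', 11), ('Q', 12), ('K', 13), ('A', 14)]

-- counts = [0]*15 ; for card in hand: c = card[0]; r = _RANKMAP[c] if c in _RANKMAP else int(c); counts[r] += 1
-- (card[0] IndexError and int(c) ValueError are excluded by Pre_; the defaults there are unreachable)
def pvCounts (hand : List String) : List Int :=
  hand.foldl (fun cs card =>
    match PySem.Str.pyGet? card 0 with
    | some c =>
      let r : Int :=
        match pvRankMap.get? c with
        | some v => v
        | none => (PySem.Int.ofStr? (String.mk [c])).getD 0
      PySem.List.pySetD cs r (PySem.List.pyGetD cs r 0 + 1)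
    | none => cs)
    (List.replicate 15 0)

-- ranks = [] ; for r in range(14, -1, -1): ranks += [r] * counts[r]
def pvBRanks (hand : List String) : List Int :=
  (PySem.List.pyRange 14 (-1) (-1)).foldl
    (fun acc r => acc ++ List.replicate (PySem.List.pyGetD (pvCounts hand) r 0).toNat r) []

def extract_ranks_alt (hand : List String) : List Int :=
  if pvBRanks hand = [14, 5, 4, 3, 2] then [5, 4, 3, 2, 1] else pvBRanks hand

-- ===== PRECONDITION & SPEC =====
-- Pre_: every card is nonempty and its first character is a digit or one of T J Q K A —
-- exactly the inputs where A raises no IndexError (empty card) / ValueError (int of a non-digit).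
def Pre_extract_ranks (hand : List String) : Prop :=
  (hand.all (fun card =>
    match card.toList with
    | c :: _ => decide (c ∈ ['0','1','2','3','4','5','6','7','8','9','T','J','Q','K','A'])
    | [] => false)) = true
instance (hand : List String) : Decidable (Pre_extract_ranks hand) := by
  unfold Pre_extract_ranks; infer_instance

def pvWitness_extract_ranks : List String := ["AS", "5H", "TD", "3C", "3S"]

def Spec_extract_ranks (hand : List String) (out : List Int) : Prop := out = extract_ranks_alt hand
instance (hand : List String) (out : List Int) : Decidable (Spec_extract_ranks hand out) := by unfold Spec_extract_ranks; infer_instance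

-- ===== CLAIM (what is proved, stated in full; the proofs are below) =====
def Claim_equal_extract_ranks : Prop := ∀ (hand : List String), Dom_extract_ranks hand → Pre_extract_ranks hand → Spec_extract_ranks hand (extract_ranks hand)

-- ===== LEMMAS AND PROOFS =====

def pvAllowed : List Char := ['0','1','2','3','4','5','6','7','8','9','T','J','Q','K','A']

def pvRanks14 : List Int := [14,13,12,11,10,9,8,7,6,5,4,3,2,1,0]

-- the rank of a card (= what B computes per card)
def pvVal (card : String) : Int :=
  match PySem.Str.pyGet? card 0 with
  | some c =>
    match pvRankMap.get? c with
    | some v => v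
    | none => (PySem.Int.ofStr? (String.mk [c])).getD 0
  | none => 0

lemma pv_card (card : String) (c : Char) (rest : List Char)
    (hc : card.toList = c :: rest) (hmem : c ∈ pvAllowed) :
    (PySem.Int.ofStr? (if pvSubs.contains (String.mk [c])
        then (pvSubs.get? (String.mk [c])).getD "" else String.mk [c])).getD 0 = pvVal card
    ∧ 0 ≤ pvVal card ∧ pvVal card < 15 := by
  have hg : PySem.Str.pyGet? card 0 = some c := by
    rw [show (0:Int) = ((0:Nat):Int) from rfl, PySem.Str.pyGet?_natCast, hc]; rfl
  unfold pvVal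
  rw [hg]
  fin_cases hmem <;> refine ⟨by decide, by decide, by decide⟩

lemma pv_setloop (cond : String → Bool) (upd : String → String) :
    ∀ (xs pre : List String),
      (PySem.List.enumerate xs (pre.length : Int)).foldl
        (fun acc p => if cond p.2 then PySem.List.pySetD acc p.1 (upd p.2) else acc) (pre ++ xs)
      = pre ++ xs.map (fun s => if cond s then upd s else s) := by
  intro xs
  induction xs with
  | nil => intro pre; simp [PySem.List.enumerate]
  | cons x xs ih =>
    intro pre
    rw [PySem.List.enumerate_cons, List.foldl_cons]
    have hstep : (if cond x then PySem.List.pySetD (pre ++ x :: xs) (pre.length : Int) (upd x)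
        else pre ++ x :: xs) = (pre ++ [if cond x then upd x else x]) ++ xs := by
      split_ifs with h
      · rw [PySem.List.pySetD_natCast]; simp
      · simp
    rw [hstep]
    have hlen : ((pre.length : Int) + 1) = (((pre ++ [if cond x then upd x else x]).length : Int)) := by
      simp
    rw [hlen, ih]
    simp

lemma pv_A_eq (hand : List String)
    (hpre : ∀ card ∈ hand, ∃ c rest, card.toList = c :: rest ∧ c ∈ pvAllowed) :
    pvRanksSorted hand = PySem.List.sorted (hand.map pvVal) (fun x => x) true := by
  unfold pvRanksSorted pvRanks1 pvRanks0
  have h1 := pv_setloop (fun s => pvSubs.contains s) (fun s => (pvSubs.get? s).getD "")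
    (hand.map (fun card =>
      match PySem.Str.pyGet? card 0 with
      | some c => String.mk [c]
      | none => "")) []
  simp only [List.length_nil, Int.natCast_zero, List.nil_append] at h1
  rw [h1, List.map_map, List.map_map]
  congr 1
  apply List.map_congr_left
  intro card hcard
  obtain ⟨c, rest, hc, hmem⟩ := hpre card hcard
  have hg : PySem.Str.pyGet? card 0 = some c := by
    rw [show (0:Int) = ((0:Nat):Int) from rfl, PySem.Str.pyGet?_natCast, hc]; rfl
  have := (pv_card card c rest hc hmem).1
  simp only [Function.comp_apply, hg]
  exact this

lemma pv_counts_spec (hand : List String)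
    (hpre : ∀ card ∈ hand, ∃ c rest, card.toList = c :: rest ∧ c ∈ pvAllowed) :
    ∀ cs : List Int, cs.length = 15 →
      (∀ j : Nat, PySem.List.pyGetD
          (hand.foldl (fun (cs : List Int) card =>
            match PySem.Str.pyGet? card 0 with
            | some c =>
              let r : Int :=
                match pvRankMap.get? c with
                | some v => v
                | none => (PySem.Int.ofStr? (String.mk [c])).getD 0
              PySem.List.pySetD cs r (PySem.List.pyGetD cs r 0 + 1)
            | none => cs) cs) (j : Int) 0
        = PySem.List.pyGetD cs (j : Int) 0 + (((hand.map pvVal).count (j : Int) : Int))) := by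
  induction hand with
  | nil => intro cs _ j; simp
  | cons card hand ih =>
    intro cs hlen j
    obtain ⟨c, rest, hc, hmem⟩ := hpre card (by simp)
    have hg : PySem.Str.pyGet? card 0 = some c := by
      rw [show (0:Int) = ((0:Nat):Int) from rfl, PySem.Str.pyGet?_natCast, hc]; rfl
    obtain ⟨-, hge, hlt⟩ := pv_card card c rest hc hmem
    have hr : (match pvRankMap.get? c with
        | some v => v
        | none => (PySem.Int.ofStr? (String.mk [c])).getD 0) = pvVal card := by
      unfold pvVal; rw [hg]
    simp only [List.foldl_cons, hg, hr]
    have hcast : pvVal card = ((pvVal card).toNat : Int) := (Int.toNat_of_nonneg hge).symm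
    have htn : (pvVal card).toNat < cs.length := by omega
    rw [ih (fun card h => hpre card (by simp [h])) _ (by rw [PySem.List.length_pySetD]; exact hlen) j]
    rw [hcast, PySem.List.pyGetD_pySetD_natCast _ _ _ _ _ htn]
    simp only [List.map_cons, List.count_cons]
    rcases eq_or_ne j (pvVal card).toNat with h | h
    · have hpj : pvVal card = (j : Int) := by omega
      rw [if_pos h, hpj]
      simp only [Int.toNat_natCast, beq_self_eq_true, if_true]
      push_cast
      ring
    · have hpj : pvVal card ≠ (j : Int) := by omega
      rw [if_neg h]
      simp [hpj]

lemma pv_flat_pairwise (f : Int → Nat) :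
    ∀ rs : List Int, rs.Pairwise (· > ·) →
      (rs.flatMap fun r => List.replicate (f r) r).Pairwise (fun a b : Int => b ≤ a) := by
  intro rs
  induction rs with
  | nil => simp
  | cons r rs ih =>
    intro hp
    rw [List.flatMap_cons, List.pairwise_append]
    refine ⟨List.pairwise_replicate.2 (by simp), ih hp.of_cons, ?_⟩
    intro a ha b hb
    obtain ⟨r', hr', hb'⟩ := List.mem_flatMap.1 hb
    have := List.eq_of_mem_replicate ha
    have := List.eq_of_mem_replicate hb'
    have : r' < r := (List.pairwise_cons.1 hp).1 r' hr'
    omega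

lemma pv_flat_count (L : List Int) :
    ∀ rs : List Int, rs.Nodup → ∀ x : Int,
      (rs.flatMap fun r => List.replicate (L.count r) r).count x
        = if x ∈ rs then L.count x else 0 := by
  intro rs
  induction rs with
  | nil => simp
  | cons r rs ih =>
    intro hnd x
    rw [List.flatMap_cons, List.count_append, List.count_replicate, ih hnd.of_cons x]
    by_cases hx : x = r
    · subst hx
      simp [List.nodup_cons.1 hnd |>.1]
    · simp [hx, Ne.symm hx, List.mem_cons]

lemma pv_sorted_eq (L : List Int) (hm : ∀ x ∈ L, 0 ≤ x ∧ x < 15) :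
    PySem.List.sorted L (fun x => x) true
      = pvRanks14.flatMap (fun r => List.replicate (L.count r) r) := by
  have hnd : pvRanks14.Nodup := by decide
  have hperm : (pvRanks14.flatMap fun r => List.replicate (L.count r) r).Perm L := by
    rw [List.perm_iff_count]
    intro x
    rw [pv_flat_count L pvRanks14 hnd x]
    by_cases hx : x ∈ pvRanks14
    · simp [hx]
    · rw [if_neg hx, eq_comm, List.count_eq_zero]
      intro hxl
      obtain ⟨h0, h1⟩ := hm x hxl
      refine hx ?_
      unfold pvRanks14
      simp only [List.mem_cons, List.not_mem_nil, or_false]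
      omega
  have hpw : (pvRanks14.flatMap fun r => List.replicate (L.count r) r).Pairwise
      (fun a b : Int => b ≤ a) := pv_flat_pairwise _ pvRanks14 (by decide)
  refine List.eq_of_perm_of_sorted (fun a b _ _ h h' => le_antisymm h' h) ?_ hpw
    ((PySem.List.sorted_perm L _ true).trans hperm.symm)
  have := PySem.List.sorted_pairwise_rev L (fun x => x)
  simpa using this

lemma pv_counts_getD (hand : List String)
    (hpre : ∀ card ∈ hand, ∃ c rest, card.toList = c :: rest ∧ c ∈ pvAllowed) :
    ∀ j : Int, 0 ≤ j →
      PySem.List.pyGetD (pvCounts hand) j 0 = (((hand.map pvVal).count j : Int)) := by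
  intro j hj
  have h0 := pv_counts_spec hand hpre (List.replicate 15 0) (by simp) j.toNat
  rw [Int.toNat_of_nonneg hj] at h0
  unfold pvCounts
  rw [h0]
  have : PySem.List.pyGetD (List.replicate 15 (0:Int)) j 0 = 0 := by
    rw [PySem.List.pyGetD_of_nonneg _ _ hj]
    unfold List.getD
    rcases Nat.lt_or_ge j.toNat 15 with h | h
    · rw [List.getElem?_replicate]; simp [h]
    · rw [List.getElem?_eq_none_iff.2 (by simpa using h)]; rfl
  rw [this, zero_add]

lemma pv_B_eq (hand : List String)
    (hpre : ∀ card ∈ hand, ∃ c rest, card.toList = c :: rest ∧ c ∈ pvAllowed) :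
    pvBRanks hand = pvRanks14.flatMap (fun r => List.replicate ((hand.map pvVal).count r) r) := by
  unfold pvBRanks
  rw [show PySem.List.pyRange 14 (-1) (-1) = pvRanks14 from by decide]
  rw [PySem.List.foldl_append_eq_flatMap, List.nil_append]
  apply List.flatMap_congr
  intro r hr
  have h0 : (0:Int) ≤ r := by fin_cases hr <;> norm_num
  rw [pv_counts_getD hand hpre r h0, Int.toNat_natCast]

-- ===== VERDICT (by name: the statement is the Claim_ definition above) =====
theorem extract_ranks_spec : Claim_equal_extract_ranks := by
  intro hand _ hpre
  unfold Spec_extract_ranks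
  have hpre' : ∀ card ∈ hand, ∃ c rest, card.toList = c :: rest ∧ c ∈ pvAllowed := by
    intro card hcard
    unfold Pre_extract_ranks at hpre
    rw [List.all_eq_true] at hpre
    have h := hpre card hcard
    cases hcl : card.toList with
    | nil => rw [hcl] at h; simp at h
    | cons c rest =>
      rw [hcl] at h
      simp only [decide_eq_true_eq] at h
      exact ⟨c, rest, rfl, by simpa [pvAllowed] using h⟩
  have hm : ∀ x ∈ hand.map pvVal, 0 ≤ x ∧ x < 15 := by
    intro x hx
    obtain ⟨card, hcard, rfl⟩ := List.mem_map.1 hx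
    obtain ⟨c, rest, hc, hmem⟩ := hpre' card hcard
    exact (pv_card card c rest hc hmem).2
  unfold extract_ranks extract_ranks_alt
  rw [pv_A_eq hand hpre', pv_B_eq hand hpre', pv_sorted_eq (hand.map pvVal) hm]
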